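-- pv_equiv track=rewrite | github.com/hpc4cmb/toast | src/toast/pshmem/shmem.py | _disthelper
-- ===== SOURCE A (Python) =====
-- def _disthelper(n, groups):
--     dist = []
--     for i in range(groups):
--         myn = n // groups
--         first = 0
--         leftover = n % groups
--         if i < leftover:
--             myn += 1
--             first = i * myn
--         else:
--             first = ((myn + 1) * leftover) + (myn * (i - leftover))
--         dist.append((first, myn))
--     return dist
-- ===== SOURCE B (Python) =====
-- def _disthelper(n, groups):
--     dist = []
--     first = 0
--     for i in range(groups):
--         myn = n // groups + (1 if i < n % groups else 0)
--         dist.append((first, myn))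
--         first += myn
--     return dist
-- ===== Notes on version B (the rewrite author's own statement) =====
-- stated objective: simpler
-- what changed: Replaces A's per-iteration closed-form position formula (two multiplication branches recomputing 'first' from scratch) with a single running prefix-sum accumulator carried across the loop.
import Mathlib
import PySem

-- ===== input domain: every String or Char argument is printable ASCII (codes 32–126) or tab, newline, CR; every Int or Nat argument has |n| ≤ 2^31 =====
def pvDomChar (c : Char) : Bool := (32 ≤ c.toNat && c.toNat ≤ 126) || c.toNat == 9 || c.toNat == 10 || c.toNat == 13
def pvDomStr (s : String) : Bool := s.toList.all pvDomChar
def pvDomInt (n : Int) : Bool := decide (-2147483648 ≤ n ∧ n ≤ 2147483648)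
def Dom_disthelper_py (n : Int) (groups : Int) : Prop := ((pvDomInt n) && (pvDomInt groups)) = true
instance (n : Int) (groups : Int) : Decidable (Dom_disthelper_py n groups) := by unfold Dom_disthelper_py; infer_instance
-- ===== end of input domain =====

-- B replaces A's closed-form position formula with a running prefix-sum accumulator (simpler).

-- ===== PORT A =====
-- For each i in range(groups): myn = n // groups, leftover = n % groups, then the branch.
def disthelper_py (n : Int) (groups : Int) : List (Int × Int) :=
  (PySem.List.pyRange 0 groups 1).foldl (fun dist i =>
    let myn := PySem.Int.floordiv n groups
    let leftover := PySem.Int.mod n groups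
    if i < leftover then
      dist ++ [(i * (myn + 1), myn + 1)]
    else
      dist ++ [((myn + 1) * leftover + myn * (i - leftover), myn)]) []

-- ===== PORT B =====
-- State is (dist, first); first accumulates the counts already assigned.
def disthelper_py_alt (n : Int) (groups : Int) : List (Int × Int) :=
  ((PySem.List.pyRange 0 groups 1).foldl (fun (s : List (Int × Int) × Int) i =>
    let myn := PySem.Int.floordiv n groups +
      (if i < PySem.Int.mod n groups then 1 else 0)
    (s.1 ++ [(s.2, myn)], s.2 + myn)) ([], 0)).1

-- ===== PRECONDITION & SPEC =====
def Spec_disthelper_py (n : Int) (groups : Int) (out : List (Int × Int)) : Prop := out = disthelper_py_alt n groups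
instance (n : Int) (groups : Int) (out : List (Int × Int)) : Decidable (Spec_disthelper_py n groups out) := by unfold Spec_disthelper_py; infer_instance

-- ===== CLAIM (what is proved, stated in full; the proofs are below) =====
def Claim_equal_disthelper_py : Prop := ∀ (n : Int) (groups : Int), Dom_disthelper_py n groups → Spec_disthelper_py n groups (disthelper_py n groups)

-- ===== LEMMAS AND PROOFS =====

-- A's closed-form "first" at index i, as a function of i.
def pvFirstA (b L i : Int) : Int :=
  if i < L then i * (b + 1) else (b + 1) * L + b * (i - L)

theorem pvFirstA_zero (b L : Int) (hL : 0 ≤ L) : pvFirstA b L 0 = 0 := by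
  unfold pvFirstA
  split_ifs with h
  · ring
  · have : L = 0 := by omega
    subst this; ring

theorem pvFirstA_succ (b L k : Int) :
    pvFirstA b L (k + 1) = pvFirstA b L k + (b + if k < L then 1 else 0) := by
  unfold pvFirstA
  by_cases h1 : k < L
  · by_cases h2 : k + 1 < L
    · simp [h1, h2]; ring
    · have : L = k + 1 := by omega
      subst this; simp; ring
  · have h2 : ¬ (k + 1 < L) := by omega
    simp [h1, h2]; ring

-- Joint invariant: over range(0, k) the two folds produce the same list, and
-- B's accumulator equals A's closed form at index k.
theorem pv_invariant (n groups : Int) (hL : 0 ≤ PySem.Int.mod n groups) (k : Nat) :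
    ((PySem.List.pyRange 0 (k : Int) 1).foldl (fun (s : List (Int × Int) × Int) i =>
      let myn := PySem.Int.floordiv n groups +
        (if i < PySem.Int.mod n groups then 1 else 0)
      (s.1 ++ [(s.2, myn)], s.2 + myn)) ([], 0))
    = ((PySem.List.pyRange 0 (k : Int) 1).foldl (fun dist i =>
        let myn := PySem.Int.floordiv n groups
        let leftover := PySem.Int.mod n groups
        if i < leftover then
          dist ++ [(i * (myn + 1), myn + 1)]
        else
          dist ++ [((myn + 1) * leftover + myn * (i - leftover), myn)]) [],
       pvFirstA (PySem.Int.floordiv n groups) (PySem.Int.mod n groups) k) := by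
  set b := PySem.Int.floordiv n groups with hb
  set L := PySem.Int.mod n groups with hLdef
  induction k with
  | zero =>
      simp [PySem.List.pyRange_one_eq_nil (by omega : (0:Int) ≤ 0), pvFirstA_zero b L hL]
  | succ m ih =>
      have hsplit : PySem.List.pyRange 0 ((m + 1 : Nat) : Int) 1
          = PySem.List.pyRange 0 (m : Int) 1 ++ [(m : Int)] := by
        have := PySem.List.pyRange_one_succ_right (a := 0) (b := (m : Int)) (by omega)
        push_cast
        push_cast at this
        exact this
      rw [hsplit, List.foldl_append, List.foldl_append, ih]
      simp only [List.foldl_cons, List.foldl_nil]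
      have hc : ((m + 1 : Nat) : Int) = (m : Int) + 1 := by push_cast; ring
      simp only [Prod.mk.injEq]
      refine ⟨?_, ?_⟩
      · by_cases h : (m : Int) < L <;> simp [h, pvFirstA]
      · rw [hc, pvFirstA_succ]

-- ===== VERDICT (by name: the statement is the Claim_ definition above) =====
theorem disthelper_py_spec : Claim_equal_disthelper_py := by
  intro n groups _
  unfold Spec_disthelper_py disthelper_py disthelper_py_alt
  by_cases hg : groups ≤ 0
  · rw [PySem.List.pyRange_one_eq_nil hg]; rfl
  · have hgpos : 0 < groups := by omega
    have hL : 0 ≤ PySem.Int.mod n groups := by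
      exact PySem.Int.mod_nonneg _ hgpos
    have hcast : ((groups.toNat : Int)) = groups := by omega
    have key := pv_invariant n groups hL groups.toNat
    rw [hcast] at key
    rw [key]
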